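-- pv_equiv track=rewrite | github.com/sbarczyk/WDI | Kolokwia/poprawkowe/21_22/Kolokwium_1/zad_1.py | how_many_free
-- ===== SOURCE A (Python) =====
-- def is_on_board(y, x, N):
--     return 0 <= y < N and 0 <= x < N
--
-- def how_many_free(T, N):
--     tab = [[False] * N for _ in range(N)]
--     moves = [(0, 0), (-2, 1), (-2, -1), (2, 1), (2, -1), (-1, 2), (1, 2), (-1, -2), (1, -2)]
--     cnt = 0
--
--     for knight in T:
--         for move in moves:
--             if is_on_board(knight[0] + move[0], knight[1] + move[1], N):
--                 tab[knight[0] + move[0]][knight[1] + move[1]] = True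
--
--     for y in range(N):
--         for x in range(N):
--             if not tab[y][x]:
--                 cnt += 1
--     return cnt
-- ===== SOURCE B (Python) =====
-- def how_many_free(T, N):
--     moves = [(0, 0), (-2, 1), (-2, -1), (2, 1), (2, -1), (-1, 2), (1, 2), (-1, -2), (1, -2)]
--     rows = {}
--     for k in T:
--         rows.setdefault(k[0], set()).add(k[1])
--     cnt = 0
--     for y in range(N):
--         attacked = set()
--         for dy, dx in moves:
--             src = rows.get(y - dy)
--             if src is not None:
--                 for kx in src:
--                     x = kx + dx
--                     if 0 <= x < N:
--                         attacked.add(x)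
--         cnt += N - len(attacked)
--     return cnt
-- ===== Notes on version B (the rewrite author's own statement) =====
-- stated objective: faster
-- what changed: Replaces A's knight-centric forward marking of a boolean N x N grid plus a full N^2 counting scan by a row-centric query: knights are grouped into a dict row -> set of columns, and for each board row the attacked-column set is built by shifting nearby knights' columns, adding N - len(attacked) per row, so no grid is allocated and no per-cell work is done.
import Mathlib
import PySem

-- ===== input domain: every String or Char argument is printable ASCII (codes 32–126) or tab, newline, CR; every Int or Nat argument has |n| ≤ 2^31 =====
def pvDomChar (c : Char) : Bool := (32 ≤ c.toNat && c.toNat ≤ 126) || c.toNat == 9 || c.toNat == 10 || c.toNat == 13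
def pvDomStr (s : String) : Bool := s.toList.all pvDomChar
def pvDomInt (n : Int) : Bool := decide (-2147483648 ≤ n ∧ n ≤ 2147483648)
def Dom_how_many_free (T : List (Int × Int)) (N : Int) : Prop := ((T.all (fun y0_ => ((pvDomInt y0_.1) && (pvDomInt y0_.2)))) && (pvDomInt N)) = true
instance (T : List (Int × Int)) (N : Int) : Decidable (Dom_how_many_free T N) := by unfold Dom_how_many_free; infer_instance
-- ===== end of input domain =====

-- B replaces A's knight-centric marking of a boolean N x N grid plus full-grid counting
-- scan by a row-centric query: knights grouped into a dict row -> set of columns, per board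
-- row the attacked-column set is built by shifting, adding N - len per row (objective: faster).

-- ===== PORT A =====
def pvIsOnBoard (y x N : Int) : Bool := decide (0 ≤ y ∧ y < N) && decide (0 ≤ x ∧ x < N)

def pvMoves : List (Int × Int) :=
  [(0, 0), (-2, 1), (-2, -1), (2, 1), (2, -1), (-1, 2), (1, 2), (-1, -2), (1, -2)]

-- tab[a][b] = True; only reached under pvIsOnBoard, so a, b are nonnegative in-range
-- indices and .toNat / setIfInBounds are exact here (the bounds-guards never fire)
def pvMark (tab : Array (Array Bool)) (a b : Int) : Array (Array Bool) :=
  tab.setIfInBounds a.toNat ((tab.getD a.toNat #[]).setIfInBounds b.toNat true)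

def how_many_free (T : List (Int × Int)) (N : Int) : Int :=
  -- tab = [[False]*N for _ in range(N)] (Python's list of lists, as an array of arrays)
  let tab0 : Array (Array Bool) := Array.replicate N.toNat (Array.replicate N.toNat false)
  let tab := T.foldl (fun tab k =>
    pvMoves.foldl (fun tab m =>
      if pvIsOnBoard (k.1 + m.1) (k.2 + m.2) N then pvMark tab (k.1 + m.1) (k.2 + m.2)
      else tab) tab) tab0
  -- tab[y][x] in the counting loops: y, x come from range(N) so the getD defaults never fire
  (PySem.List.pyRange 0 N 1).foldl (fun cnt y =>
    (PySem.List.pyRange 0 N 1).foldl (fun cnt x =>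
      if ((tab.getD y.toNat #[]).getD x.toNat false) = false then cnt + 1 else cnt) cnt) 0

-- ===== PORT B =====
def how_many_free_alt (T : List (Int × Int)) (N : Int) : Int :=
  -- rows = {}; for k in T: rows.setdefault(k[0], set()).add(k[1])
  let rows : PySem.Dict Int (PySem.Set Int) :=
    T.foldl (fun d k => d.modify k.1 PySem.Set.empty (fun s => PySem.Set.add s k.2)) PySem.Dict.empty
  -- per row y: attacked = set of columns hit by a knight in a nearby row; cnt += N - len(attacked)
  -- (the inner 'for kx in src' iterates a Python set; only len(attacked) is used, which is
  -- independent of that iteration order, so the port over the Set's list order is exact)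
  (PySem.List.pyRange 0 N 1).foldl (fun cnt y =>
    let attacked : PySem.Set Int := pvMoves.foldl (fun s m =>
      match rows.get? (y - m.1) with
      | none => s
      | some src => src.foldl (fun s kx =>
          if 0 ≤ kx + m.2 ∧ kx + m.2 < N then PySem.Set.add s (kx + m.2) else s) s) PySem.Set.empty
    cnt + (N - PySem.Set.len attacked)) 0

-- ===== PRECONDITION & SPEC =====
def Spec_how_many_free (T : List (Int × Int)) (N : Int) (out : Int) : Prop := out = how_many_free_alt T N
instance (T : List (Int × Int)) (N : Int) (out : Int) : Decidable (Spec_how_many_free T N out) := by unfold Spec_how_many_free; infer_instance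

-- ===== CLAIM (what is proved, stated in full; the proofs are below) =====
def Claim_equal_how_many_free : Prop := ∀ (T : List (Int × Int)) (N : Int), Dom_how_many_free T N → Spec_how_many_free T N (how_many_free T N)

-- ===== LEMMAS AND PROOFS =====

-- read of tab[y][x] used in the proofs
def pvGetB (tab : Array (Array Bool)) (y x : Int) : Bool :=
  (tab.getD y.toNat #[]).getD x.toNat false

-- shape of an N×N table
def pvSh (N : Int) (tab : Array (Array Bool)) : Prop :=
  tab.size = N.toNat ∧ ∀ i : Nat, i < tab.size → (tab.getD i #[]).size = N.toNat

-- A's marking phase, flattened to one fold over candidate cells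
def pvMarkFold (N : Int) (cells : List (Int × Int)) (tab : Array (Array Bool)) : Array (Array Bool) :=
  cells.foldl (fun tab c => if pvIsOnBoard c.1 c.2 N then pvMark tab c.1 c.2 else tab) tab

def pvCells (T : List (Int × Int)) : List (Int × Int) :=
  T.flatMap (fun k => pvMoves.map (fun m => (k.1 + m.1, k.2 + m.2)))

def pvTab0 (N : Int) : Array (Array Bool) :=
  Array.replicate N.toNat (Array.replicate N.toNat false)

lemma pvSh_mark {N : Int} {tab : Array (Array Bool)} (h : pvSh N tab)
    {a : Int} (b : Int) (ha : 0 ≤ a ∧ a < N) : pvSh N (pvMark tab a b) := by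
  obtain ⟨hlen, hrow⟩ := h
  have haN : a.toNat < tab.size := by rw [hlen]; omega
  refine ⟨by simp [pvMark, hlen], ?_⟩
  intro i hi
  rw [pvMark, Array.size_setIfInBounds] at hi
  by_cases hia : i = a.toNat
  · subst hia
    rw [pvMark, Array.getD_eq_getD_getElem?, Array.getElem?_setIfInBounds_self_of_lt haN]
    simpa using hrow _ haN
  · rw [pvMark, Array.getD_eq_getD_getElem?,
      Array.getElem?_setIfInBounds_ne (fun he => hia he.symm), ← Array.getD_eq_getD_getElem?]
    exact hrow _ hi

lemma pvGetB_mark {N : Int} {tab : Array (Array Bool)} (h : pvSh N tab)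
    {a b y x : Int} (ha : 0 ≤ a ∧ a < N) (hb : 0 ≤ b ∧ b < N)
    (hy : 0 ≤ y ∧ y < N) (hx : 0 ≤ x ∧ x < N) :
    pvGetB (pvMark tab a b) y x = if a = y ∧ b = x then true else pvGetB tab y x := by
  obtain ⟨hlen, hrow⟩ := h
  have haN : a.toNat < tab.size := by rw [hlen]; omega
  by_cases hay : a = y
  · subst hay
    have hbN : b.toNat < (tab.getD a.toNat #[]).size := by rw [hrow _ haN]; omega
    simp only [pvGetB, pvMark, Array.getD_eq_getD_getElem?,
      Array.getElem?_setIfInBounds_self_of_lt haN, Option.getD_some]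
    by_cases hbx : b = x
    · subst hbx
      have hbN' : b.toNat < (tab[a.toNat]?.getD #[]).size := by
        rw [← Array.getD_eq_getD_getElem?]; exact hbN
      simp [Array.getElem?_setIfInBounds_self_of_lt hbN']
    · have hne : b.toNat ≠ x.toNat := by omega
      simp [Array.getElem?_setIfInBounds_ne hne, hbx]
  · have hne : a.toNat ≠ y.toNat := by omega
    simp [pvGetB, pvMark, Array.getD_eq_getD_getElem?, Array.getElem?_setIfInBounds_ne hne, hay]

lemma pvGetB_markFold {N : Int} (cells : List (Int × Int)) {tab : Array (Array Bool)}
    (h : pvSh N tab) {y x : Int} (hy : 0 ≤ y ∧ y < N) (hx : 0 ≤ x ∧ x < N) :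
    pvGetB (pvMarkFold N cells tab) y x = (pvGetB tab y x || cells.any (fun c => c = (y, x))) := by
  induction cells generalizing tab with
  | nil => simp [pvMarkFold]
  | cons c cs ih =>
    simp only [pvMarkFold, List.foldl_cons] at *
    by_cases hob : pvIsOnBoard c.1 c.2 N = true
    · have hc : (0 ≤ c.1 ∧ c.1 < N) ∧ (0 ≤ c.2 ∧ c.2 < N) := by
        simpa [pvIsOnBoard] using hob
      rw [hob, if_pos rfl] at *
      rw [ih (pvSh_mark h _ hc.1), pvGetB_mark h hc.1 hc.2 hy hx]
      by_cases hcyx : c = (y, x)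
      · have : c.1 = y ∧ c.2 = x := by rw [hcyx]; exact ⟨rfl, rfl⟩
        simp [hcyx]
      · have : ¬(c.1 = y ∧ c.2 = x) := by
          intro ⟨h1, h2⟩; exact hcyx (Prod.ext h1 h2)
        simp [this, hcyx]
    · have hcyx : ¬(c = (y, x)) := by
        intro hc; subst hc
        exact hob (by simp [pvIsOnBoard]; omega)
      rw [if_neg hob, ih h]
      simp [hcyx]

lemma pvGetB_tab0 (N : Int) (y x : Int) : pvGetB (pvTab0 N) y x = false := by
  simp only [pvGetB, pvTab0, Array.getD_eq_getD_getElem?, Array.getElem?_replicate]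
  split_ifs <;> simp [Array.getElem?_replicate]
  split_ifs <;> simp

lemma pvSh_tab0 (N : Int) : pvSh N (pvTab0 N) := by
  refine ⟨by simp [pvTab0], ?_⟩
  intro i hi
  simp only [pvTab0, Array.size_replicate] at hi
  simp [pvTab0, Array.getD_eq_getD_getElem?, hi]

-- A's marking double-fold equals pvMarkFold over the flattened cell list
lemma pvFold_eq_markFold (T : List (Int × Int)) (N : Int) (tab : Array (Array Bool)) :
    T.foldl (fun tab k =>
      pvMoves.foldl (fun tab m =>
        if pvIsOnBoard (k.1 + m.1) (k.2 + m.2) N then pvMark tab (k.1 + m.1) (k.2 + m.2)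
        else tab) tab) tab = pvMarkFold N (pvCells T) tab := by
  induction T generalizing tab with
  | nil => simp [pvCells, pvMarkFold]
  | cons k ks ih =>
    simp only [List.foldl_cons, pvCells, List.flatMap_cons, pvMarkFold, List.foldl_append,
      List.foldl_map] at *
    rw [ih]

-- a cell c is a marked candidate iff some offset's reverse lands on a knight
lemma pvAny_cells_iff (T : List (Int × Int)) (c : Int × Int) :
    ((pvCells T).any (fun d => d = c))
      = pvMoves.any (fun m => decide ((c.1 - m.1, c.2 - m.2) ∈ T)) := by
  rw [Bool.eq_iff_iff]
  simp only [List.any_eq_true, pvCells, List.mem_flatMap, List.mem_map, decide_eq_true_iff]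
  constructor
  · rintro ⟨d, ⟨k, hk, m, hm, rfl⟩, rfl⟩
    refine ⟨m, hm, ?_⟩
    have : (k.1 + m.1 - m.1, k.2 + m.2 - m.2) = k := by
      apply Prod.ext <;> simp
    rw [this]; exact hk
  · rintro ⟨m, hm, hmem⟩
    refine ⟨c, ⟨(c.1 - m.1, c.2 - m.2), hmem, m, hm, ?_⟩, rfl⟩
    apply Prod.ext <;> simp

-- B's row dict and per-row attacked set, as proof-side names (identical terms to the port's lets)
def pvRows (T : List (Int × Int)) : PySem.Dict Int (PySem.Set Int) :=
  T.foldl (fun d k => d.modify k.1 PySem.Set.empty (fun s => PySem.Set.add s k.2)) PySem.Dict.empty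

def pvAttacked (T : List (Int × Int)) (N y : Int) : PySem.Set Int :=
  pvMoves.foldl (fun s m =>
    match (pvRows T).get? (y - m.1) with
    | none => s
    | some src => src.foldl (fun s kx =>
        if 0 ≤ kx + m.2 ∧ kx + m.2 < N then PySem.Set.add s (kx + m.2) else s) s) PySem.Set.empty

-- column kx is recorded under row ky iff (ky, kx) is a knight
lemma pvMem_rows (T : List (Int × Int)) (ky kx : Int) :
    kx ∈ (pvRows T).getD ky PySem.Set.empty ↔ (ky, kx) ∈ T := by
  suffices h : ∀ d : PySem.Dict Int (PySem.Set Int),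
      kx ∈ (T.foldl (fun d k => d.modify k.1 PySem.Set.empty (fun s => PySem.Set.add s k.2)) d).getD ky PySem.Set.empty
        ↔ kx ∈ d.getD ky PySem.Set.empty ∨ (ky, kx) ∈ T by
    rw [pvRows, h]
    simp [PySem.Dict.getD_empty, PySem.Set.empty]
  intro d
  induction T generalizing d with
  | nil => simp
  | cons k ks ih =>
    rw [List.foldl_cons, ih, PySem.Dict.getD_modify]
    by_cases hk : ky = k.1
    · subst hk
      rw [if_pos rfl, PySem.Set.mem_add]
      constructor
      · rintro (⟨h | rfl⟩ | h)
        · exact Or.inl h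
        · exact Or.inr (List.mem_cons_self)
        · exact Or.inr (List.mem_cons_of_mem _ h)
      · rintro (h | h)
        · exact Or.inl (Or.inl h)
        · rcases List.mem_cons.1 h with heq | h
          · exact Or.inl (Or.inr (congrArg Prod.snd heq))
          · exact Or.inr h
    · rw [if_neg hk]
      constructor
      · rintro (h | h)
        · exact Or.inl h
        · exact Or.inr (List.mem_cons_of_mem _ h)
      · rintro (h | h)
        · exact Or.inl h
        · rcases List.mem_cons.1 h with heq | h
          · exact absurd (congrArg Prod.fst heq) hk
          · exact Or.inr h

-- membership in the inner conditional-add fold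
lemma pvMem_addIf (l : List Int) (N dx : Int) (s : PySem.Set Int) (x : Int) :
    x ∈ l.foldl (fun s kx => if 0 ≤ kx + dx ∧ kx + dx < N then PySem.Set.add s (kx + dx) else s) s
      ↔ x ∈ s ∨ ∃ kx ∈ l, (0 ≤ kx + dx ∧ kx + dx < N) ∧ x = kx + dx := by
  induction l generalizing s with
  | nil => simp
  | cons a l ih =>
    rw [List.foldl_cons]
    by_cases h : 0 ≤ a + dx ∧ a + dx < N
    · rw [if_pos h, ih, PySem.Set.mem_add]
      constructor
      · rintro (⟨h1 | rfl⟩ | ⟨kx, hkx, hb, rfl⟩)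
        · exact Or.inl h1
        · exact Or.inr ⟨a, List.mem_cons_self, h, rfl⟩
        · exact Or.inr ⟨kx, List.mem_cons_of_mem _ hkx, hb, rfl⟩
      · rintro (h1 | ⟨kx, hkx, hb, rfl⟩)
        · exact Or.inl (Or.inl h1)
        · rcases List.mem_cons.1 hkx with rfl | hkx
          · exact Or.inl (Or.inr rfl)
          · exact Or.inr ⟨kx, hkx, hb, rfl⟩
    · rw [if_neg h, ih]
      constructor
      · rintro (h1 | ⟨kx, hkx, hb, rfl⟩)
        · exact Or.inl h1
        · exact Or.inr ⟨kx, List.mem_cons_of_mem _ hkx, hb, rfl⟩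
      · rintro (h1 | ⟨kx, hkx, hb, rfl⟩)
        · exact Or.inl h1
        · rcases List.mem_cons.1 hkx with rfl | hkx
          · exact absurd hb h
          · exact Or.inr ⟨kx, hkx, hb, rfl⟩

-- the match on rows.get? is the fold over rows.getD (empty set folds to s)
lemma pvMatch_eq (d : PySem.Dict Int (PySem.Set Int)) (ky : Int)
    (f : PySem.Set Int → Int → PySem.Set Int) (s : PySem.Set Int) :
    (match d.get? ky with
     | none => s
     | some src => src.foldl f s) = (d.getD ky PySem.Set.empty).foldl f s := by
  cases h : d.get? ky <;>
    simp [PySem.Dict.getD_eq_get?_getD, h, PySem.Set.empty]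

-- membership in the per-row attacked set
lemma pvMem_attacked (T : List (Int × Int)) (N y x : Int) :
    x ∈ pvAttacked T N y
      ↔ ∃ m ∈ pvMoves, ∃ kx, (y - m.1, kx) ∈ T ∧ (0 ≤ kx + m.2 ∧ kx + m.2 < N) ∧ x = kx + m.2 := by
  suffices h : ∀ (ms : List (Int × Int)) (s : PySem.Set Int),
      x ∈ ms.foldl (fun s m =>
        match (pvRows T).get? (y - m.1) with
        | none => s
        | some src => src.foldl (fun s kx =>
            if 0 ≤ kx + m.2 ∧ kx + m.2 < N then PySem.Set.add s (kx + m.2) else s) s) s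
        ↔ x ∈ s ∨ ∃ m ∈ ms, ∃ kx, (y - m.1, kx) ∈ T ∧ (0 ≤ kx + m.2 ∧ kx + m.2 < N) ∧ x = kx + m.2 by
    rw [pvAttacked, h]
    simp [PySem.Set.empty]
  intro ms
  induction ms with
  | nil => simp
  | cons m ms ih =>
    intro s
    rw [List.foldl_cons, pvMatch_eq, ih, pvMem_addIf]
    constructor
    · rintro (⟨h1 | ⟨kx, hkx, hb, rfl⟩⟩ | ⟨m', hm', kx, hkx, hb, rfl⟩)
      · exact Or.inl h1
      · exact Or.inr ⟨m, List.mem_cons_self, kx, (pvMem_rows T _ kx).1 hkx, hb, rfl⟩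
      · exact Or.inr ⟨m', List.mem_cons_of_mem _ hm', kx, hkx, hb, rfl⟩
    · rintro (h1 | ⟨m', hm', kx, hkx, hb, rfl⟩)
      · exact Or.inl (Or.inl h1)
      · rcases List.mem_cons.1 hm' with rfl | hm'
        · exact Or.inl (Or.inr ⟨kx, (pvMem_rows T _ kx).2 hkx, hb, rfl⟩)
        · exact Or.inr ⟨m', hm', kx, hkx, hb, rfl⟩

-- the attacked set has no duplicates
lemma pvNodup_attacked (T : List (Int × Int)) (N y : Int) : (pvAttacked T N y).Nodup := by
  suffices h : ∀ (ms : List (Int × Int)) (s : PySem.Set Int), s.Nodup →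
      (ms.foldl (fun s m =>
        match (pvRows T).get? (y - m.1) with
        | none => s
        | some src => src.foldl (fun s kx =>
            if 0 ≤ kx + m.2 ∧ kx + m.2 < N then PySem.Set.add s (kx + m.2) else s) s) s).Nodup by
    exact h _ _ (by simp [PySem.Set.empty])
  have hin : ∀ (dx : Int) (l : List Int) (s : PySem.Set Int), s.Nodup →
      (l.foldl (fun s kx => if 0 ≤ kx + dx ∧ kx + dx < N then PySem.Set.add s (kx + dx) else s) s).Nodup := by
    intro dx l
    induction l with
    | nil => intro s hs; exact hs
    | cons a l ih =>
      intro s hs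
      rw [List.foldl_cons]
      by_cases h : 0 ≤ a + dx ∧ a + dx < N
      · rw [if_pos h]; exact ih _ (PySem.Set.nodup_add _ _ hs)
      · rw [if_neg h]; exact ih _ hs
  intro ms
  induction ms with
  | nil => intro s hs; exact hs
  | cons m ms ih =>
    intro s hs
    rw [List.foldl_cons, pvMatch_eq]
    exact ih _ (hin m.2 _ s hs)

-- len(attacked) counts the attacked columns of row y among 0..N-1
lemma pvLen_attacked (T : List (Int × Int)) (N y : Int) :
    (pvAttacked T N y).length
      = (PySem.List.pyRange 0 N 1).countP (fun x => decide (x ∈ pvAttacked T N y)) := by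
  rw [List.countP_eq_length_filter]
  refine List.Perm.length_eq ((List.perm_ext_iff_of_nodup (pvNodup_attacked T N y)
    (((PySem.List.nodup_pyRange_one 0 N)).filter _)).2 ?_)
  intro x
  rw [List.mem_filter, PySem.List.mem_pyRange_one]
  constructor
  · intro h
    obtain ⟨m, hm, kx, hkx, hb, rfl⟩ := (pvMem_attacked T N y x).1 h
    exact ⟨⟨by omega, by omega⟩, by simpa using h⟩
  · intro ⟨_, h⟩
    simpa using h

-- per board row: A's free-cell count equals N - len(attacked)
lemma pvRow_eq (T : List (Int × Int)) (N y : Int) (hy : 0 ≤ y ∧ y < N) :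
    (((PySem.List.pyRange 0 N 1).countP
        (fun x => !pvGetB (pvMarkFold N (pvCells T) (pvTab0 N)) y x) : Nat) : Int)
      = N - PySem.Set.len (pvAttacked T N y) := by
  have hcongr : (PySem.List.pyRange 0 N 1).countP
        (fun x => !pvGetB (pvMarkFold N (pvCells T) (pvTab0 N)) y x)
      = (PySem.List.pyRange 0 N 1).countP (fun x => !decide (x ∈ pvAttacked T N y)) := by
    apply List.countP_congr
    intro x hx
    rw [PySem.List.mem_pyRange_one] at hx
    have hget := pvGetB_markFold (N := N) (pvCells T) (pvSh_tab0 N)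
      (y := y) (x := x) (by omega) (by omega)
    rw [pvGetB_tab0, Bool.false_or] at hget
    have hiff : (pvMoves.any (fun m => decide (((y, x).1 - m.1, (y, x).2 - m.2) ∈ T)))
        = decide (x ∈ pvAttacked T N y) := by
      rw [Bool.eq_iff_iff]
      simp only [List.any_eq_true, decide_eq_true_iff]
      rw [pvMem_attacked]
      constructor
      · rintro ⟨m, hm, hmem⟩
        exact ⟨m, hm, x - m.2, by simpa using hmem, ⟨by omega, by omega⟩, by omega⟩
      · rintro ⟨m, hm, kx, hkx, hb, rfl⟩
        refine ⟨m, hm, ?_⟩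
        simpa using hkx
    rw [hget, pvAny_cells_iff T (y, x), hiff]
  have hsplit : (PySem.List.pyRange 0 N 1).length
      = (PySem.List.pyRange 0 N 1).countP (fun x => decide (x ∈ pvAttacked T N y))
        + (PySem.List.pyRange 0 N 1).countP (fun x => !decide (x ∈ pvAttacked T N y)) := by
    have h := List.length_eq_countP_add_countP (fun x => decide (x ∈ pvAttacked T N y))
      (l := PySem.List.pyRange 0 N 1)
    simpa using h
  have hlen : (PySem.List.pyRange 0 N 1).length = N.toNat := by
    rw [PySem.List.length_pyRange_one]; omega
  have hla := pvLen_attacked T N y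
  rw [hcongr]
  rw [show PySem.Set.len (pvAttacked T N y) = ((pvAttacked T N y).length : Int) from rfl, hla]
  omega

-- ===== VERDICT (by name: the statement is the Claim_ definition above) =====
theorem how_many_free_spec : Claim_equal_how_many_free := by
  intro T N _
  unfold Spec_how_many_free
  show how_many_free T N = how_many_free_alt T N
  simp only [how_many_free, how_many_free_alt]
  rw [show Array.replicate N.toNat (Array.replicate N.toNat false) = pvTab0 N from rfl,
    pvFold_eq_markFold]
  simp only [← Bool.not_eq_true']
  simp only [PySem.List.foldl_count_if, PySem.List.foldl_add]
  rw [zero_add, zero_add]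
  apply congrArg List.sum
  apply List.map_congr_left
  intro y hy
  rw [PySem.List.mem_pyRange_one] at hy
  have h := pvRow_eq T N y ⟨by omega, by omega⟩
  exact h
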